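-- pv_equiv track=rewrite | github.com/EricHeGitHub/python-predicting-stress-in-english-words | methods.py | VCC_search
-- ===== SOURCE A (Python) =====
-- def count_vowel_number(word):
--     number = 0
--     for pronunciation in word:
--         if isVowel(pronunciation) ==1:
--             number +=1
--     return number
--
-- def VCC_search(pronunciations):
--     vowel_count = 0
--     number = count_vowel_number(pronunciations)
--     VC_string = ''
--     following_c = ''
--     for pronunciation_index in range(len(pronunciations)):
--         if isVowel(pronunciations[pronunciation_index]) == 1:
--             vowel_count +=1
--             if vowel_count == number:
--                 last_vowel = pronunciations[pronunciation_index]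
--                 if pronunciation_index == len(pronunciations) -1:
--                     following_c = ''
--                 elif pronunciation_index == len(pronunciations) -2:
--                     following_c = pronunciations[pronunciation_index+1]
--                 else:
--                     following_c = pronunciations[pronunciation_index+1]+pronunciations[pronunciation_index+2]
--                 VCC_string = last_vowel + following_c
--     return VCC_string
--
-- def isVowel(pronunciation):
--     vowel = ['AA','AE','AH', 'AO', 'AW', 'AY', 'EH', 'ER','EY', 'IH','IY','OW','OY','UH', 'UW']
--     if pronunciation in vowel:
--         return 1
--     return 0
-- ===== SOURCE B (Python) =====
-- # Backward scan: walk the list from the end carrying the (at most two) phonemes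
-- # seen so far; the first vowel met is the last vowel of the word.
-- # Note: on vowel-free input A raises UnboundLocalError; B returns ''.
-- VOWELS = frozenset(['AA', 'AE', 'AH', 'AO', 'AW', 'AY', 'EH', 'ER',
--                     'EY', 'IH', 'IY', 'OW', 'OY', 'UH', 'UW'])
--
-- def VCC_search(pronunciations):
--     nxt = []  # up to two phonemes following the current position
--     for p in reversed(pronunciations):
--         if p in VOWELS:
--             return p + ''.join(nxt)
--         nxt = [p] + nxt[:1]
--     return ''
-- ===== Notes on version B (the rewrite author's own statement) =====
-- stated objective: simpler
-- what changed: A counts all vowels first, then scans forward by index tracking a running vowel count and special-casing the last two index positions; B makes a single backward pass over the list carrying the at-most-two following phonemes and returns at the first vowel met (the last vowel), with no counting pre-pass and no index arithmetic.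
import Mathlib
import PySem

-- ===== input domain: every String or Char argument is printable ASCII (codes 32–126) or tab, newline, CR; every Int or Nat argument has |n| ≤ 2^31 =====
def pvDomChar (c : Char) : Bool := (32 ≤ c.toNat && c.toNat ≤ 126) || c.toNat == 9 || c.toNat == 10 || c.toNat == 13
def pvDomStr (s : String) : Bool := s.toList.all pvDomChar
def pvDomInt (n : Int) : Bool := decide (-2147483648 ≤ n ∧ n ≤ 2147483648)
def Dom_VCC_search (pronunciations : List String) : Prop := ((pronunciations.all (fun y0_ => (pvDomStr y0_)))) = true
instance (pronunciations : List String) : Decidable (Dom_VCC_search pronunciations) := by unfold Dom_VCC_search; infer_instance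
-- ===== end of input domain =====

-- B replaces A's count-then-index-scan with a single backward walk carrying the at-most-two
-- following phonemes (objective: simpler, one pass, no counting pre-pass).

-- ===== PORT A =====
def pvVowels : List String :=
  ["AA", "AE", "AH", "AO", "AW", "AY", "EH", "ER", "EY", "IH", "IY", "OW", "OY", "UH", "UW"]

def isVowel (pronunciation : String) : Int :=
  if pronunciation ∈ pvVowels then 1 else 0

def count_vowel_number (word : List String) : Int :=
  word.foldl (fun number pronunciation => if isVowel pronunciation == 1 then number + 1 else number) 0

def vccStep (pronunciations : List String) (number : Int)
    (st : Int × Option String) (pronunciation_index : Int) : Int × Option String :=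
  if isVowel (PySem.List.pyGetD pronunciations pronunciation_index "") == 1 then
    let vowel_count := st.1 + 1
    if vowel_count == number then
      let last_vowel := PySem.List.pyGetD pronunciations pronunciation_index ""
      let following_c :=
        if pronunciation_index == (pronunciations.length : Int) - 1 then ""
        else if pronunciation_index == (pronunciations.length : Int) - 2 then
          PySem.List.pyGetD pronunciations (pronunciation_index + 1) ""
        else
          PySem.List.pyGetD pronunciations (pronunciation_index + 1) "" ++
            PySem.List.pyGetD pronunciations (pronunciation_index + 2) ""
      (vowel_count, some (last_vowel ++ following_c))
    else (vowel_count, st.2)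
  else st

def VCC_search (pronunciations : List String) : String :=
  let number := count_vowel_number pronunciations
  let res := (PySem.List.pyRange 0 (pronunciations.length : Int)).foldl
      (vccStep pronunciations number) (0, none)
  -- `none` models VCC_string never being assigned (Python raises UnboundLocalError; outside Pre_)
  res.2.getD ""

-- ===== PORT B =====
def vccGo : List String → List String → String
  | [], _ => ""
  | p :: rest, nxt =>
    if p ∈ pvVowels then p ++ PySem.Str.join "" nxt
    else vccGo rest ([p] ++ nxt.take 1)

def VCC_search_alt (pronunciations : List String) : String :=
  vccGo pronunciations.reverse []

-- ===== PRECONDITION & SPEC =====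
-- Pre_ excludes exactly the vowel-free lists, on which A raises UnboundLocalError
-- (it returns the never-assigned local VCC_string).
def Pre_VCC_search (pronunciations : List String) : Prop :=
  ∃ p ∈ pronunciations, p ∈ pvVowels
instance (pronunciations : List String) : Decidable (Pre_VCC_search pronunciations) := by
  unfold Pre_VCC_search; infer_instance

def pvWitness_VCC_search : List String := ["K", "AE", "T"]

def Spec_VCC_search (pronunciations : List String) (out : String) : Prop := out = VCC_search_alt pronunciations
instance (pronunciations : List String) (out : String) : Decidable (Spec_VCC_search pronunciations out) := by unfold Spec_VCC_search; infer_instance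

-- ===== CLAIM (what is proved, stated in full; the proofs are below) =====
def Claim_equal_VCC_search : Prop := ∀ (pronunciations : List String), Dom_VCC_search pronunciations → Pre_VCC_search pronunciations → Spec_VCC_search pronunciations (VCC_search pronunciations)

-- ===== LEMMAS AND PROOFS =====

-- last vowel of the list together with the phonemes after it (none = no vowel)
def lastVS : List String → Option (String × List String)
  | [] => none
  | p :: rest =>
    match lastVS rest with
    | some r => some r
    | none => if p ∈ pvVowels then some (p, rest) else none

-- the common specification both ports compute
def specOf (l : List String) : String :=
  match lastVS l with
  | none => ""
  | some (v, a) => v ++ PySem.Str.join "" (a.take 2)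

def cntV (l : List String) : Nat := l.countP (fun p => decide (p ∈ pvVowels))

lemma isVowel_eq_one (p : String) : (isVowel p == 1) = decide (p ∈ pvVowels) := by
  by_cases h : p ∈ pvVowels <;> simp [isVowel, h]

lemma count_vowel_number_eq (l : List String) : count_vowel_number l = (cntV l : Int) := by
  unfold count_vowel_number cntV
  simp only [isVowel_eq_one]
  rw [PySem.List.foldl_count_if]
  simp

lemma lastVS_eq_none_iff (l : List String) : lastVS l = none ↔ cntV l = 0 := by
  induction l with
  | nil => simp [lastVS, cntV]
  | cons p rest ih =>
    have hcons : cntV (p :: rest) = cntV rest + (if p ∈ pvVowels then 1 else 0) := by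
      by_cases hp : p ∈ pvVowels <;> simp [cntV, hp, Nat.add_comm]
    simp only [lastVS, hcons]
    cases h : lastVS rest with
    | some r =>
      have hr : cntV rest ≠ 0 := fun hc => by simp [ih.mpr hc] at h
      constructor
      · intro hx; simp at hx
      · intro hx; exact absurd (Nat.add_eq_zero_iff.mp hx).1 hr
    | none =>
      simp only [ih.mp h]
      by_cases hp : p ∈ pvVowels <;> simp [hp]

lemma lastVS_append_singleton (xs : List String) (y : String) :
    lastVS (xs ++ [y]) = if y ∈ pvVowels then some (y, []) else
      (lastVS xs).map (fun r => (r.1, r.2 ++ [y])) := by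
  induction xs with
  | nil => simp [lastVS]
  | cons p xs ih =>
    simp only [List.cons_append, lastVS, ih]
    by_cases hy : y ∈ pvVowels
    · simp [hy]
    · simp only [hy, if_false]
      cases lastVS xs with
      | some r => simp
      | none => by_cases hp : p ∈ pvVowels <;> simp [hp]

lemma lastVS_append_of_some (l1 rest : List String) (r : String × List String)
    (h : lastVS rest = some r) : lastVS (l1 ++ rest) = some r := by
  induction l1 with
  | nil => simpa using h
  | cons a l1 ih => simp [lastVS, ih]

lemma lastVS_last_vowel (l1 : List String) (x : String) (l2 : List String)
    (hx : x ∈ pvVowels) (h2 : cntV l2 = 0) : lastVS (l1 ++ x :: l2) = some (x, l2) := by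
  apply lastVS_append_of_some
  simp [lastVS, (lastVS_eq_none_iff l2).mpr h2, hx]

lemma take2_push (a : List String) (y : String) (nxt : List String) :
    (a ++ y :: nxt).take 2 = (a ++ y :: nxt.take 1).take 2 := by
  rcases a with _ | ⟨a1, _ | ⟨a2, as⟩⟩ <;> cases nxt <;> simp

lemma vccGo_spec (l : List String) : ∀ nxt : List String, nxt.length ≤ 2 →
    vccGo l.reverse nxt =
      match lastVS l with
      | none => ""
      | some (v, a) => v ++ PySem.Str.join "" ((a ++ nxt).take 2) := by
  induction l using List.reverseRecOn with
  | nil => intro nxt h; simp [vccGo, lastVS]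
  | append_singleton xs y ih =>
    intro nxt h
    rw [List.reverse_append, List.reverse_singleton, List.singleton_append,
      lastVS_append_singleton]
    show vccGo (y :: xs.reverse) nxt = _
    by_cases hy : y ∈ pvVowels
    · simp only [vccGo, hy, if_true]
      simp [List.take_of_length_le h]
    · simp only [vccGo, hy, if_false]
      rw [ih ([y] ++ nxt.take 1) (by simp only [List.length_append, List.length_cons, List.length_take, List.length_nil]; omega)]
      cases hx : lastVS xs with
      | none => simp
      | some r =>
        simp only [Option.map_some]
        simp only [List.singleton_append, List.append_assoc]
        rw [← take2_push]

lemma alt_eq_specOf (l : List String) : VCC_search_alt l = specOf l := by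
  unfold VCC_search_alt specOf
  rw [vccGo_spec l [] (by simp)]
  cases lastVS l with
  | none => rfl
  | some r => simp

lemma foldA_inv (l : List String) (k : Nat) (hk : k ≤ l.length) :
    (PySem.List.pyRange 0 (k : Int)).foldl (vccStep l (cntV l : Int)) (0, none)
      = ((cntV (l.take k) : Int),
         if cntV (l.take k) = cntV l ∧ 0 < cntV l then
           (lastVS l).map (fun r => r.1 ++ PySem.Str.join "" (r.2.take 2))
         else none) := by
  induction k with
  | zero =>
    have h0 : PySem.List.pyRange 0 ((0:Nat):Int) = [] := by
      rw [PySem.List.pyRange_zero_natCast]; rfl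
    rw [h0]
    simp only [List.foldl_nil, List.take_zero]
    rw [if_neg (fun hc => by have h1 := hc.1; have h2 := hc.2; rw [show cntV ([]:List String) = 0 from rfl] at h1; omega)]
    simp [cntV]
  | succ k ihk =>
    have hklt : k < l.length := hk
    have hcast : ((k+1:Nat):Int) = (k:Int) + 1 := by push_cast; ring
    rw [hcast, PySem.List.pyRange_one_succ_right (Int.natCast_nonneg k), List.foldl_append,
      List.foldl_cons, List.foldl_nil, ihk (Nat.le_of_succ_le hk)]
    have hget : PySem.List.pyGetD l (k:Int) "" = l[k] := by
      rw [PySem.List.pyGetD_natCast, List.getD_eq_getElem l "" hklt]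
    have htake : l.take (k+1) = l.take k ++ [l[k]] := by
      rw [List.take_add_one]; simp [List.getElem?_eq_getElem hklt]
    have hsplit : l = l.take k ++ l[k] :: l.drop (k+1) := by
      conv_lhs => rw [← List.take_append_drop (k+1) l]
      rw [htake, List.append_assoc, List.singleton_append]
    have hcnt : cntV (l.take (k+1)) = cntV (l.take k) + (if l[k] ∈ pvVowels then 1 else 0) := by
      by_cases hp : l[k] ∈ pvVowels <;>
        simp only [cntV, htake, List.countP_append, List.countP_cons, List.countP_nil, hp,
          decide_true, decide_false, Bool.false_eq_true, if_true, if_false]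
    have hcnt_all : cntV l = cntV (l.take (k+1)) + cntV (l.drop (k+1)) := by
      simp only [cntV]
      rw [← List.countP_append, List.take_append_drop]
    simp only [vccStep, hget, isVowel_eq_one]
    by_cases hp : l[k] ∈ pvVowels
    · simp only [hp, decide_true]
      rw [if_pos trivial, if_pos hp] at *
      by_cases heq : cntV (l.take (k+1)) = cntV l
      · have hbeq : ((cntV (List.take k l) : Int) + 1 == (cntV l : Int)) = true := by
          simp only [beq_iff_eq]; omega
        rw [hbeq, if_pos rfl, if_pos (show cntV (List.take (k+1) l) = cntV l ∧ 0 < cntV l from ⟨heq, by omega⟩)]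
        have hdrop0 : cntV (l.drop (k+1)) = 0 := by omega
        have hlvs : lastVS l = some (l[k], l.drop (k+1)) := by
          conv_lhs => rw [hsplit]
          exact lastVS_last_vowel _ _ _ hp hdrop0
        rw [hlvs]
        simp only [Option.map_some, Prod.mk.injEq]
        refine ⟨by omega, ?_⟩
        have hdlen : (l.drop (k+1)).length = l.length - (k+1) := List.length_drop
        rcases hd : l.drop (k+1) with _ | ⟨d1, _ | ⟨d2, ds⟩⟩ <;> rw [hd] at hdlen
        · have hn : l.length = k + 1 := by simp at hdlen; omega
          have hb1 : ((k : Int) == (l.length : Int) - 1) = true := by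
            simp only [beq_iff_eq]; omega
          rw [hb1, if_pos rfl]
          rfl
        · have hn : l.length = k + 2 := by simp at hdlen; omega
          have hb1 : ((k : Int) == (l.length : Int) - 1) = false := by
            simp only [beq_eq_false_iff_ne, ne_eq]; omega
          have hb2 : ((k : Int) == (l.length : Int) - 2) = true := by
            simp only [beq_iff_eq]; omega
          rw [hb1, hb2]
          simp only [Bool.false_eq_true, if_false]
          have hD := List.drop_eq_getElem_cons (show k + 1 < l.length by omega) (l := l)
          rw [hd] at hD
          injection hD with hd1 _
          have : ((k : Int) + 1) = ((k + 1 : Nat) : Int) := by push_cast; ring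
          rw [this, PySem.List.pyGetD_natCast, List.getD_eq_getElem l "" (by omega), ← hd1]
          simp [PySem.Str.join, PySem.Chars.join_singleton]
        · have hn : k + 2 < l.length := by simp at hdlen; omega
          have hb1 : ((k : Int) == (l.length : Int) - 1) = false := by
            simp only [beq_eq_false_iff_ne, ne_eq]; omega
          have hb2 : ((k : Int) == (l.length : Int) - 2) = false := by
            simp only [beq_eq_false_iff_ne, ne_eq]; omega
          rw [hb1, hb2]
          simp only [Bool.false_eq_true, if_false]
          have hD := List.drop_eq_getElem_cons (show k + 1 < l.length by omega) (l := l)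
          rw [hd, List.drop_eq_getElem_cons (show k + 2 < l.length by omega) (l := l)] at hD
          injection hD with hd1 hD
          injection hD with hd2 _
          have e1 : ((k : Int) + 1) = ((k + 1 : Nat) : Int) := by push_cast; ring
          have e2 : ((k : Int) + 2) = ((k + 2 : Nat) : Int) := by push_cast; ring
          rw [e1, e2, PySem.List.pyGetD_natCast, PySem.List.pyGetD_natCast,
            List.getD_eq_getElem l "" (by omega), List.getD_eq_getElem l "" (by omega),
            ← hd1, ← hd2]
          simp [PySem.Str.join, PySem.Chars.join_cons_cons, PySem.Chars.join_singleton]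
      · have hbeq : ((cntV (List.take k l) : Int) + 1 == (cntV l : Int)) = false := by
          simp only [beq_eq_false_iff_ne, ne_eq]; omega
        rw [hbeq]
        simp only [Bool.false_eq_true, if_false]
        rw [if_neg (fun hc => by have := hc.1; omega),
          if_neg (fun hc => by have := hc.1; omega)]
        simp only [Prod.mk.injEq]
        exact ⟨by omega, trivial⟩
    · simp only [hp, decide_false, Bool.false_eq_true, if_false]
      rw [if_neg hp] at hcnt
      rw [show cntV (List.take (k+1) l) = cntV (List.take k l) from by omega]



lemma a_eq_specOf (l : List String) : VCC_search l = specOf l := by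
  show (List.foldl (vccStep l (count_vowel_number l)) (0, none)
      (PySem.List.pyRange 0 (l.length : Int))).2.getD "" = specOf l
  rw [count_vowel_number_eq, foldA_inv l l.length le_rfl]
  simp only [List.take_length]
  by_cases h0 : cntV l = 0
  · rw [if_neg (fun hc => by omega)]
    unfold specOf
    rw [(lastVS_eq_none_iff l).mpr h0]
    rfl
  · rw [if_pos ⟨trivial, Nat.pos_of_ne_zero h0⟩]
    unfold specOf
    cases hx : lastVS l with
    | none => exact absurd ((lastVS_eq_none_iff l).mp hx) h0
    | some r => simp

-- ===== VERDICT (by name: the statement is the Claim_ definition above) =====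
theorem VCC_search_spec : Claim_equal_VCC_search := by
  intro l _ _
  unfold Spec_VCC_search
  rw [a_eq_specOf, alt_eq_specOf]
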